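-- pv_equiv track=rewrite | github.com/hejijunhao/trajan-agent | app/services/file_selector.py | _truncate_tree
-- ===== SOURCE A (Python) =====
-- MAX_TREE_FILES = 1000  # Truncate tree if larger than this
--
-- PRIORITY_DIRECTORIES = [
--     "src/",
--     "app/",
--     "lib/",
--     "api/",
--     "routes/",
--     "pages/",
--     "components/",
--     "models/",
--     "services/",
--     "controllers/",
--     "handlers/",
--     "domain/",
--     "core/",
--     "pkg/",
--     "cmd/",
--     "internal/",
-- ]
--
-- def _truncate_tree(file_paths: list[str]) -> list[str]:
--     """
--     Truncate a large file tree to MAX_TREE_FILES.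
--
--     Prioritization strategy:
--     1. Files in priority directories (src/, app/, api/, etc.)
--     2. Files at shallower depths
--     3. Source code files over config/docs
--     """
--     # Categorize files
--     priority_files: list[str] = []
--     other_files: list[str] = []
--
--     for path in file_paths:
--         is_priority = any(path.startswith(d) or f"/{d}" in path for d in PRIORITY_DIRECTORIES)
--         if is_priority:
--             priority_files.append(path)
--         else:
--             other_files.append(path)
--
--     # Sort by depth (shallower first) within each category
--     priority_files.sort(key=lambda p: p.count("/"))
--     other_files.sort(key=lambda p: p.count("/"))
--
--     # Take priority files first, then fill with others
--     result = priority_files[:MAX_TREE_FILES]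
--     remaining_slots = MAX_TREE_FILES - len(result)
--
--     if remaining_slots > 0:
--         result.extend(other_files[:remaining_slots])
--
--     return result
-- ===== SOURCE B (Python) =====
-- MAX_TREE_FILES = 1000
--
-- PRIORITY_DIRECTORIES = [
--     "src/",
--     "app/",
--     "lib/",
--     "api/",
--     "routes/",
--     "pages/",
--     "components/",
--     "models/",
--     "services/",
--     "controllers/",
--     "handlers/",
--     "domain/",
--     "core/",
--     "pkg/",
--     "cmd/",
--     "internal/",
-- ]
--
--
-- def _truncate_tree(file_paths: list[str]) -> list[str]:
--     # Bucket paths by depth (slash count) into per-depth lists,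
--     # separately for priority and other files; appending keeps input order,
--     # so concatenating buckets by increasing depth reproduces a stable sort.
--     priority_buckets: dict[int, list[str]] = {}
--     other_buckets: dict[int, list[str]] = {}
--     max_depth = 0
--     for path in file_paths:
--         depth = path.count("/")
--         if depth > max_depth:
--             max_depth = depth
--         is_priority = any(path.startswith(d) or f"/{d}" in path for d in PRIORITY_DIRECTORIES)
--         if is_priority:
--             priority_buckets.setdefault(depth, []).append(path)
--         else:
--             other_buckets.setdefault(depth, []).append(path)
--
--     priority_files: list[str] = []
--     other_files: list[str] = []
--     for depth in range(max_depth + 1):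
--         priority_files += priority_buckets.get(depth, [])
--         other_files += other_buckets.get(depth, [])
--
--     result = priority_files[:MAX_TREE_FILES]
--     remaining = MAX_TREE_FILES - len(result)
--     if remaining > 0:
--         result += other_files[:remaining]
--     return result
-- ===== Notes on version B (the rewrite author's own statement) =====
-- stated objective: alternative
-- what changed: Replaces the two comparison sorts by depth with a single-pass bucket sort: paths are grouped into per-depth lists in input order and the buckets are concatenated by increasing depth, which reproduces the stable sort exactly.
import Mathlib
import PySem

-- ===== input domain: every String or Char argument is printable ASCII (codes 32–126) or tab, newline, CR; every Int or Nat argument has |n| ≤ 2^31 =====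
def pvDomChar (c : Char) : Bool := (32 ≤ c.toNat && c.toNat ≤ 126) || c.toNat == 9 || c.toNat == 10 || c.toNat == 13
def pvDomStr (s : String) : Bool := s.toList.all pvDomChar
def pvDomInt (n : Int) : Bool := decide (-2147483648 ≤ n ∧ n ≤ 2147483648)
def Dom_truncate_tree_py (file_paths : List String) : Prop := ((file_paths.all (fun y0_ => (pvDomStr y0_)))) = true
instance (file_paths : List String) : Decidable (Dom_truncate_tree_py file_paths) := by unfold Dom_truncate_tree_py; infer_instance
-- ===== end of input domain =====

-- B replaces A's two comparison sorts by depth with a one-pass bucket sort keyed on the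
-- slash count (buckets kept in input order, concatenated by increasing depth): an
-- alternative algorithm producing the identical stable order.

-- ===== PORT A =====
def pvPriorityDirs : List String :=
  ["src/", "app/", "lib/", "api/", "routes/", "pages/", "components/", "models/",
   "services/", "controllers/", "handlers/", "domain/", "core/", "pkg/", "cmd/", "internal/"]

-- is_priority = any(path.startswith(d) or f"/{d}" in path for d in PRIORITY_DIRECTORIES)
def pvIsPriority (path : String) : Bool :=
  pvPriorityDirs.any (fun d => PySem.Str.startswith path d || PySem.Str.isIn ("/" ++ d) path)

-- key=lambda p: p.count("/")
def pvDepth (p : String) : Nat := PySem.Str.count p "/"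

-- the categorising loop: append to priority_files / other_files
def pvCatStep (s : List String × List String) (path : String) : List String × List String :=
  if pvIsPriority path then (s.1 ++ [path], s.2) else (s.1, s.2 ++ [path])

def truncate_tree_py (file_paths : List String) : List String :=
  let cat := file_paths.foldl pvCatStep ([], [])
  let priority_files := PySem.List.sorted cat.1 pvDepth false
  let other_files := PySem.List.sorted cat.2 pvDepth false
  let result := PySem.List.slice priority_files none (some (1000 : Int))
  let remaining_slots : Int := 1000 - result.length
  if remaining_slots > 0 then result ++ PySem.List.slice other_files none (some remaining_slots)
  else result

-- ===== PORT B =====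
-- one-pass loop state: (priority_buckets, other_buckets, max_depth);
-- setdefault(depth, []).append(path) is Dict.modify depth [] (· ++ [path])
def pvBucketStep (s : PySem.Dict Nat (List String) × PySem.Dict Nat (List String) × Nat)
    (path : String) : PySem.Dict Nat (List String) × PySem.Dict Nat (List String) × Nat :=
  let depth := pvDepth path
  let max_depth := if depth > s.2.2 then depth else s.2.2
  if pvIsPriority path then (s.1.modify depth [] (· ++ [path]), s.2.1, max_depth)
  else (s.1, s.2.1.modify depth [] (· ++ [path]), max_depth)

-- the concatenation loop body: priority_files += pr.get(depth, []); other_files += ot.get(depth, [])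
def pvConcatStep (pr ot : PySem.Dict Nat (List String)) (s : List String × List String)
    (depth : Nat) : List String × List String :=
  (s.1 ++ pr.getD depth [], s.2 ++ ot.getD depth [])

def truncate_tree_py_alt (file_paths : List String) : List String :=
  let st := file_paths.foldl pvBucketStep (PySem.Dict.empty, PySem.Dict.empty, 0)
  let lists := (List.range (st.2.2 + 1)).foldl (pvConcatStep st.1 st.2.1) ([], [])
  let result := PySem.List.slice lists.1 none (some (1000 : Int))
  let remaining : Int := 1000 - result.length
  if remaining > 0 then result ++ PySem.List.slice lists.2 none (some remaining)
  else result

-- ===== PRECONDITION & SPEC =====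
def Spec_truncate_tree_py (file_paths : List String) (out : List String) : Prop := out = truncate_tree_py_alt file_paths
instance (file_paths : List String) (out : List String) : Decidable (Spec_truncate_tree_py file_paths out) := by unfold Spec_truncate_tree_py; infer_instance

-- ===== CLAIM (what is proved, stated in full; the proofs are below) =====
def Claim_equal_truncate_tree_py : Prop := ∀ (file_paths : List String), Dom_truncate_tree_py file_paths → Spec_truncate_tree_py file_paths (truncate_tree_py file_paths)

-- ===== LEMMAS AND PROOFS =====

-- insertBy lands exactly between the elements it is not "before" and those it is
theorem pv_insertBy_append {α : Type} (p : α → α → Bool) (x : α) (A B : List α)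
    (hA : ∀ a ∈ A, p x a = false) (hB : ∀ b ∈ B, p x b = true) :
    PySem.List.insertBy p x (A ++ B) = A ++ x :: B := by
  induction A with
  | nil =>
      cases B with
      | nil => simp [PySem.List.insertBy]
      | cons b t => simp [PySem.List.insertBy, hB b (by simp)]
  | cons a A ih =>
      simp only [List.cons_append, PySem.List.insertBy, hA a (by simp)]
      simp only [Bool.false_eq_true, if_false]
      rw [ih (fun a ha => hA a (by simp [ha])) ]

-- stability of Python's sort with a Nat key, as bucket concatenation
theorem pv_sorted_eq_flatMap {α : Type} (key : α → Nat) (xs : List α) (N : Nat)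
    (h : ∀ x ∈ xs, key x < N) :
    PySem.List.sorted xs key false
      = (List.range N).flatMap (fun d => xs.filter (fun x => key x == d)) := by
  induction xs using List.reverseRecOn with
  | nil => simp [PySem.List.sorted_eq_foldl_insertBy]
  | append_singleton ys x ih =>
      have hx : key x < N := h x (by simp)
      have hys : ∀ y ∈ ys, key y < N := fun y hy => h y (by simp [hy])
      have hsort : PySem.List.sorted (ys ++ [x]) key false
          = PySem.List.insertBy (fun a b => decide (key a < key b)) x
              (PySem.List.sorted ys key false) := by
        rw [PySem.List.sorted_eq_foldl_insertBy, PySem.List.sorted_eq_foldl_insertBy,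
            List.foldl_append]
        rfl
      rw [hsort, ih hys]
      set k := key x with hk
      have hsplit : List.range N = List.range (k + 1) ++ (List.range (N - (k+1))).map (k + 1 + ·) := by
        rw [← List.range_add]
        congr 1
        omega
      rw [hsplit]
      rw [List.flatMap_append, List.flatMap_append]
      have hA : ∀ a ∈ (List.range (k+1)).flatMap (fun d => ys.filter (fun y => key y == d)),
          decide (key x < key a) = false := by
        intro a ha
        rw [List.mem_flatMap] at ha
        obtain ⟨d, hd, hfa⟩ := ha
        have h1 := List.mem_range.mp hd
        have h2 := (List.mem_filter.mp hfa).2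
        simp only [beq_iff_eq] at h2
        simp only [decide_eq_false_iff_not]
        omega
      have hB : ∀ b ∈ ((List.range (N - (k+1))).map (k + 1 + ·)).flatMap
          (fun d => ys.filter (fun y => key y == d)), decide (key x < key b) = true := by
        intro b hb
        rw [List.mem_flatMap] at hb
        obtain ⟨d, hd, hfb⟩ := hb
        rw [List.mem_map] at hd
        obtain ⟨j, hj, rfl⟩ := hd
        have h2 := (List.mem_filter.mp hfb).2
        simp only [beq_iff_eq] at h2
        simp only [decide_eq_true_eq]
        omega
      rw [pv_insertBy_append _ _ _ _ hA hB]
      have h1 : ((List.range (N - (k+1))).map (k + 1 + ·)).flatMap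
            (fun d => (ys ++ [x]).filter (fun y => key y == d))
          = ((List.range (N - (k+1))).map (k + 1 + ·)).flatMap
            (fun d => ys.filter (fun y => key y == d)) := by
        apply List.flatMap_congr
        intro d hd
        rw [List.mem_map] at hd
        obtain ⟨j, hj, rfl⟩ := hd
        rw [List.filter_append]
        have hemp : (List.filter (fun y => key y == k + 1 + j) [x]) = [] := by
          rw [List.filter_singleton]
          have : (key x == k + 1 + j) = false := by simp; omega
          simp [this]
        simp [hemp]
      have h2 : (List.range (k+1)).flatMap (fun d => (ys ++ [x]).filter (fun y => key y == d))
          = (List.range (k+1)).flatMap (fun d => ys.filter (fun y => key y == d)) ++ [x] := by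
        rw [List.range_succ, List.flatMap_append, List.flatMap_append]
        simp only [List.flatMap_singleton]
        have hlast : (ys ++ [x]).filter (fun y => key y == k)
            = ys.filter (fun y => key y == k) ++ [x] := by
          rw [List.filter_append, List.filter_singleton]
          simp [hk]
        have hrest : (List.range k).flatMap (fun d => (ys ++ [x]).filter (fun y => key y == d))
            = (List.range k).flatMap (fun d => ys.filter (fun y => key y == d)) := by
          apply List.flatMap_congr
          intro d hd
          have hdk : d < k := List.mem_range.mp hd
          rw [List.filter_append]
          have hemp : (List.filter (fun y => key y == d) [x]) = [] := by
            rw [List.filter_singleton]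
            have : (key x == d) = false := by simp; omega
            simp [this]
          simp [hemp]
        rw [hlast, hrest]
        simp [List.append_assoc]
      rw [h1, h2]
      simp

-- characterisation of B's bucket loop: priority buckets
theorem pv_bucket_fst (xs : List String) (dp dq : PySem.Dict Nat (List String)) (m : Nat) (c : Nat) :
    ((xs.foldl pvBucketStep (dp, dq, m)).1).getD c []
      = dp.getD c [] ++ xs.filter (fun p => pvIsPriority p && (pvDepth p == c)) := by
  induction xs generalizing dp dq m with
  | nil => simp
  | cons x t ih =>
      simp only [List.foldl_cons, List.filter_cons]
      by_cases hp : pvIsPriority x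
      · simp only [pvBucketStep, hp, if_true]
        rw [ih, PySem.Dict.getD_modify]
        by_cases hd : c = pvDepth x
        · simp [hd]
        · have hd' : ¬ (pvDepth x = c) := fun h => hd h.symm
          simp [hd, hd']
      · simp [pvBucketStep, hp, ih]

-- characterisation of B's bucket loop: other buckets
theorem pv_bucket_snd (xs : List String) (dp dq : PySem.Dict Nat (List String)) (m : Nat) (c : Nat) :
    ((xs.foldl pvBucketStep (dp, dq, m)).2.1).getD c []
      = dq.getD c [] ++ xs.filter (fun p => !pvIsPriority p && (pvDepth p == c)) := by
  induction xs generalizing dp dq m with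
  | nil => simp
  | cons x t ih =>
      simp only [List.foldl_cons, List.filter_cons]
      by_cases hp : pvIsPriority x
      · simp [pvBucketStep, hp, ih]
      · simp only [pvBucketStep, hp, Bool.false_eq_true, if_false]
        rw [ih, PySem.Dict.getD_modify]
        by_cases hd : c = pvDepth x
        · simp [hd]
        · have hd' : ¬ (pvDepth x = c) := fun h => hd h.symm
          simp [hd, hd']

-- B's running maximum bounds every depth
theorem pv_bucket_max (xs : List String) (dp dq : PySem.Dict Nat (List String)) (m : Nat) :
    m ≤ (xs.foldl pvBucketStep (dp, dq, m)).2.2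
      ∧ ∀ x ∈ xs, pvDepth x ≤ (xs.foldl pvBucketStep (dp, dq, m)).2.2 := by
  induction xs generalizing dp dq m with
  | nil => simp
  | cons x t ih =>
      simp only [List.foldl_cons]
      by_cases hp : pvIsPriority x
      · simp only [pvBucketStep, hp, if_true]
        obtain ⟨h1, h2⟩ := ih (dp.modify (pvDepth x) [] (· ++ [x])) dq
            (if pvDepth x > m then pvDepth x else m)
        constructor
        · exact le_trans (by split <;> omega) h1
        · intro y hy
          rcases List.mem_cons.mp hy with rfl | hyt
          · exact le_trans (by split <;> omega) h1
          · exact h2 y hyt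
      · simp only [pvBucketStep, hp]
        obtain ⟨h1, h2⟩ := ih dp (dq.modify (pvDepth x) [] (· ++ [x]))
            (if pvDepth x > m then pvDepth x else m)
        constructor
        · exact le_trans (by split <;> omega) h1
        · intro y hy
          rcases List.mem_cons.mp hy with rfl | hyt
          · exact le_trans (by split <;> omega) h1
          · exact h2 y hyt

-- A's categorising loop is the two filters
theorem pv_cat_eq (xs : List String) :
    xs.foldl pvCatStep ([], [])
      = (xs.filter pvIsPriority, xs.filter (fun p => !pvIsPriority p)) := by
  have hstep : pvCatStep = fun (s : List String × List String) path =>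
      ((if pvIsPriority path then s.1 ++ [path] else s.1),
       (if !pvIsPriority path then s.2 ++ [path] else s.2)) := by
    funext s p
    by_cases h : pvIsPriority p <;> simp [pvCatStep, h]
  rw [hstep]
  refine Eq.trans (PySem.List.foldl_prod_mk
      (fun (l : List String) path => if pvIsPriority path then l ++ [path] else l)
      (fun (l : List String) path => if !pvIsPriority path then l ++ [path] else l) xs [] []) ?_
  rw [PySem.List.foldl_append_if_eq_filter, PySem.List.foldl_append_if_eq_filter]
  simp

-- ===== VERDICT (by name: the statement is the Claim_ definition above) =====
theorem truncate_tree_py_spec : Claim_equal_truncate_tree_py := by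
  intro file_paths _
  unfold Spec_truncate_tree_py
  simp only [truncate_tree_py, truncate_tree_py_alt]
  rw [pv_cat_eq]
  set st := file_paths.foldl pvBucketStep (PySem.Dict.empty, PySem.Dict.empty, 0) with hst
  obtain ⟨-, hmax⟩ := pv_bucket_max file_paths PySem.Dict.empty PySem.Dict.empty 0
  -- the concatenation loop, split into its two components
  have hconcat : (List.range (st.2.2 + 1)).foldl (pvConcatStep st.1 st.2.1) ([], [])
      = ((List.range (st.2.2 + 1)).flatMap (fun d => st.1.getD d []),
         (List.range (st.2.2 + 1)).flatMap (fun d => st.2.1.getD d [])) := by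
    refine Eq.trans (PySem.List.foldl_prod_mk
        (fun (l : List String) d => l ++ st.1.getD d [])
        (fun (l : List String) d => l ++ st.2.1.getD d [])
        (List.range (st.2.2 + 1)) [] []) ?_
    rw [PySem.List.foldl_append_eq_flatMap, PySem.List.foldl_append_eq_flatMap]
    simp
  rw [hconcat]
  -- the priority lists agree
  have hP : PySem.List.sorted (file_paths.filter pvIsPriority) pvDepth false
      = (List.range (st.2.2 + 1)).flatMap (fun d => st.1.getD d []) := by
    rw [pv_sorted_eq_flatMap pvDepth _ (st.2.2 + 1)
        (fun x hx => Nat.lt_succ_of_le (hmax x (List.mem_of_mem_filter hx)))]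
    apply List.flatMap_congr
    intro d _
    rw [pv_bucket_fst, PySem.Dict.getD_empty, List.nil_append, List.filter_filter]
    simp only [Bool.and_comm]
  -- the other lists agree
  have hO : PySem.List.sorted (file_paths.filter (fun p => !pvIsPriority p)) pvDepth false
      = (List.range (st.2.2 + 1)).flatMap (fun d => st.2.1.getD d []) := by
    rw [pv_sorted_eq_flatMap pvDepth _ (st.2.2 + 1)
        (fun x hx => Nat.lt_succ_of_le (hmax x (List.mem_of_mem_filter hx)))]
    apply List.flatMap_congr
    intro d _
    rw [pv_bucket_snd, PySem.Dict.getD_empty, List.nil_append, List.filter_filter]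
    simp only [Bool.and_comm]
  simp only [hP, hO]
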